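-- pv_equiv track=rewrite | github.com/Mateusz-Malendowski/python | chaoticEncryption/attack.py | convertDNA8int
-- ===== SOURCE A (Python) =====
-- def convertDNA8int(x):
--     res = ""
--     while len(x) > 0:
--         c = x[0]
--         x = x[1:]
--         if c == "A":
--             res += "00"
--         elif c == "T":
--             res += "11"
--         elif c == "G":
--             res += "01"
--         else:
--             res += "10"
--     return int(res, 2)
-- ===== SOURCE B (Python) =====
-- def convertDNA8int(x):
--     if not x:
--         raise ValueError("invalid literal for int() with base 2: ''")
--     r = 0
--     for c in x:
--         if c == "A":
--             code = 0
--         elif c == "G":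
--             code = 1
--         elif c == "T":
--             code = 3
--         else:
--             code = 2
--         r = r * 4 + code
--     return r
-- ===== Notes on version B (the rewrite author's own statement) =====
-- stated objective: simpler
-- what changed: B drops the binary-string intermediate and evaluates the value directly with a base-4 Horner accumulator (r = r*4 + code) in one pass over the characters; like A it raises ValueError on the empty string (excluded by Pre_).
-- outside the precondition, e.g. on convertDNA8int(''): A raises ValueError, B raises ValueError
import Mathlib
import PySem

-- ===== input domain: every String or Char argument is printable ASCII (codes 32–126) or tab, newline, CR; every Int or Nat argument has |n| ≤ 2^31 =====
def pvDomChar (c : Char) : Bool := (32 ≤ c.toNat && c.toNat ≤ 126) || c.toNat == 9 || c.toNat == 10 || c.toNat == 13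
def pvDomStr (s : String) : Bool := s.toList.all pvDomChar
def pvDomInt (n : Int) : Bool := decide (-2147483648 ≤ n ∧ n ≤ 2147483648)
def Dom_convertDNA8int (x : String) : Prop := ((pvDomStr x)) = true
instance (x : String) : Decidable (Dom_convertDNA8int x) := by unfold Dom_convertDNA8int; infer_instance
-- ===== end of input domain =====

-- B replaces A's binary-string building + int(·,2) by a one-pass base-4 Horner accumulator (simpler; same cost class).
-- Both A and B raise ValueError on the empty string, which Pre_ excludes.

-- ===== PORT A =====
-- two-bit code string for one character, in A's branch order
def pvBitsA (c : Char) : List Char :=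
  if c = 'A' then ['0', '0']
  else if c = 'T' then ['1', '1']
  else if c = 'G' then ['0', '1']
  else ['1', '0']

-- int(res, 2) on a (nonempty) string of '0'/'1' digits; hand-ported, exact on that domain
def pvParseBin (l : List Char) : Int :=
  l.foldl (fun a c => a * 2 + (if c = '1' then 1 else 0)) 0

def convertDNA8int (x : String) : Int :=
  pvParseBin (x.toList.foldl (fun r c => r ++ pvBitsA c) [])

-- ===== PORT B =====
def pvCodeB (c : Char) : Int :=
  if c = 'A' then 0
  else if c = 'G' then 1
  else if c = 'T' then 3
  else 2

def convertDNA8int_alt (x : String) : Int :=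
  x.toList.foldl (fun r c => r * 4 + pvCodeB c) 0

-- ===== PRECONDITION & SPEC =====
-- Pre_ excludes only the empty string, on which A raises ValueError (int('', 2)); B raises there too.
def Pre_convertDNA8int (x : String) : Prop := x ≠ ""
instance (x : String) : Decidable (Pre_convertDNA8int x) := by unfold Pre_convertDNA8int; infer_instance
def pvWitness_convertDNA8int : String := "GATTACA"

def Spec_convertDNA8int (x : String) (out : Int) : Prop := out = convertDNA8int_alt x
instance (x : String) (out : Int) : Decidable (Spec_convertDNA8int x out) := by unfold Spec_convertDNA8int; infer_instance

-- ===== CLAIM (what is proved, stated in full; the proofs are below) =====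
def Claim_equal_convertDNA8int : Prop := ∀ (x : String), Dom_convertDNA8int x → Pre_convertDNA8int x → Spec_convertDNA8int x (convertDNA8int x)

-- ===== LEMMAS AND PROOFS =====
theorem pvParseBin_append_bits (init : List Char) (c : Char) :
    pvParseBin (init ++ pvBitsA c) = pvParseBin init * 4 + pvCodeB c := by
  unfold pvParseBin pvBitsA pvCodeB
  by_cases hA : c = 'A' <;> by_cases hT : c = 'T' <;> by_cases hG : c = 'G' <;>
    simp_all [List.foldl_append] <;> ring

theorem pvHorner (cs : List Char) (init : List Char) :
    pvParseBin (cs.foldl (fun r c => r ++ pvBitsA c) init) =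
      cs.foldl (fun r c => r * 4 + pvCodeB c) (pvParseBin init) := by
  induction cs generalizing init with
  | nil => rfl
  | cons c cs ih =>
    rw [List.foldl_cons, List.foldl_cons, ih, pvParseBin_append_bits]

-- ===== VERDICT (by name: the statement is the Claim_ definition above) =====
theorem convertDNA8int_spec : Claim_equal_convertDNA8int := by
  intro x _ _
  unfold Spec_convertDNA8int convertDNA8int convertDNA8int_alt
  simpa [pvParseBin] using pvHorner x.toList []
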